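-- pv_equiv track=rewrite | github.com/chengming-1/python-algorithm- | CC1/solution.py | sort_of_sorted
-- ===== SOURCE A (Python) =====
-- def sort_of_sorted(subject):
--     """
--     Determine the longest sublist of strings in alphabetical order.
--     :param data: [list] of strings in semi-sorted order
--     :return: tuple containing
--         [0]: [int] length of longest sorted sublist
--         [1]: [list] longest sorted sublist of strings
--     """
--     if not subject:
--         return 0, []
--     times = 0
--     result = [[subject[0]]]
--     for i in range(1, len(subject)):
--         if subject[i][0] < subject[i-1][0]:
--             times += 1
--             result.append([subject[i]])
--         elif subject[i] == subject[i-1]: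
--             result[times].append(subject[i])
--         elif subject[i][0] == subject[i-1][0]:
--             if subject[i][1] < subject[i-1][1]:
--                 times += 1
--                 result.append([subject[i]])
--             else:
--                 result[times].append(subject[i])
--         else:
--             result[times].append(subject[i])
--     result = sorted(result, key=len, reverse=True)[0]
--     return len(result), result
-- ===== SOURCE B (Python) =====
-- def sort_of_sorted(subject):
--     """Two staged passes over indices: collect the run-start positions, then slice
--     out the segment at the first widest gap between consecutive break indices."""
--     if not subject:
--         return 0, []
--     n = len(subject)
--     breaks = [0]
--     for i in range(1, n):
--         prev, cur = subject[i - 1], subject[i]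
--         if cur[0] < prev[0] or (cur != prev and cur[0] == prev[0] and cur[1] < prev[1]):
--             breaks.append(i)
--     breaks.append(n)
--     start, end = max(zip(breaks, breaks[1:]), key=lambda p: p[1] - p[0])
--     return end - start, subject[start:end]
-- ===== Notes on version B (the rewrite author's own statement) =====
-- stated objective: alternative
-- what changed: B never materializes the runs: a first pass records only the run-start indices, then max over adjacent index pairs (first widest gap, matching sorted's stable first-longest tie-break) picks the answer, which is produced by one slice of the input; A builds every run as a list of lists and sorts the runs by length.
import Mathlib
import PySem

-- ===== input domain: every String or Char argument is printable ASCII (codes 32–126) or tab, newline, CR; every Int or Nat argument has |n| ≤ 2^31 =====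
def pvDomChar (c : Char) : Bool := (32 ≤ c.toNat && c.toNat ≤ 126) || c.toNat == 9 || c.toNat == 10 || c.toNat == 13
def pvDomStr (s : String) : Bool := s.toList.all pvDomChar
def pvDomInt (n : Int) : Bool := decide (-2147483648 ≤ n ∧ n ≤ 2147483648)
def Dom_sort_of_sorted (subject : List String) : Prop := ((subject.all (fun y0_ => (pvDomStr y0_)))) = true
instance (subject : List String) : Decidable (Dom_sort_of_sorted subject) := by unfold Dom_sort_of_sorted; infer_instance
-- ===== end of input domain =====

-- B records only the run-start indices in a first pass, then picks the first widest gap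
-- between consecutive break indices and slices it out of the input, instead of A's
-- materializing every run as a list of lists and sorting the runs by length.

-- ===== PORT A =====
-- s[i] for a string (Pre_ keeps the index in range; default is never read inside Pre_)
def pvCharAtD (s : String) (i : Int) : Char := PySem.List.pyGetD s.toList i ' '

-- the body of A's for-loop, on (times, result) and the two strings subject[i-1], subject[i]
def pvStepA (st : Int × List (List String)) (prev cur : String) : Int × List (List String) :=
  let times := st.1
  let result := st.2
  if pvCharAtD cur 0 < pvCharAtD prev 0 then
    (times + 1, result ++ [[cur]])
  else if cur = prev then
    (times, PySem.List.pySetD result times (PySem.List.pyGetD result times [] ++ [cur]))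
  else if pvCharAtD cur 0 = pvCharAtD prev 0 then
    (if pvCharAtD cur 1 < pvCharAtD prev 1 then
      (times + 1, result ++ [[cur]])
    else
      (times, PySem.List.pySetD result times (PySem.List.pyGetD result times [] ++ [cur])))
  else
    (times, PySem.List.pySetD result times (PySem.List.pyGetD result times [] ++ [cur]))

def sort_of_sorted (subject : List String) : Int × List String :=
  if subject = [] then (0, [])
  else
    let st := (PySem.List.pyRange 1 (PySem.List.len subject) 1).foldl
      (fun st i => pvStepA st (PySem.List.pyGetD subject (i - 1) "") (PySem.List.pyGetD subject i ""))
      (0, [[PySem.List.pyGetD subject 0 ""]])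
    let res := PySem.List.pyGetD (PySem.List.sorted st.2 (fun r => PySem.List.len r) true) 0 []
    (PySem.List.len res, res)

-- ===== PORT B =====
-- B's run-start test: cur[0] < prev[0] or (cur != prev and cur[0] == prev[0] and cur[1] < prev[1])
def pvNewRun (prev cur : String) : Bool :=
  decide (pvCharAtD cur 0 < pvCharAtD prev 0) ||
  (decide (cur ≠ prev) && decide (pvCharAtD cur 0 = pvCharAtD prev 0) &&
   decide (pvCharAtD cur 1 < pvCharAtD prev 1))

-- max(pairs, key=lambda p: p[1]-p[0]): first maximal (Python max replaces only on strict >);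
-- the [] case is unreachable in sort_of_sorted_alt (Python max raises on an empty sequence)
def pvMaxPair (ps : List (Int × Int)) : Int × Int :=
  match ps with
  | [] => (0, 0)
  | p :: rest => rest.foldl (fun best q => if q.2 - q.1 > best.2 - best.1 then q else best) p

def sort_of_sorted_alt (subject : List String) : Int × List String :=
  if subject = [] then (0, [])
  else
    let n : Int := PySem.List.len subject
    let breaks := ((PySem.List.pyRange 1 n 1).foldl
      (fun bs i =>
        if pvNewRun (PySem.List.pyGetD subject (i - 1) "") (PySem.List.pyGetD subject i "") then
          bs ++ [i]
        else bs) [(0 : Int)]) ++ [n]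
    let se := pvMaxPair (breaks.zip breaks.tail)
    (se.2 - se.1, PySem.List.slice subject (some se.1) (some se.2))

-- ===== PRECONDITION & SPEC =====
-- Pre_ excludes exactly the inputs where Python A raises IndexError: a consecutive pair with an
-- empty string (s[0] is taken of both), or an unequal pair with equal first characters where
-- either string has length 1 (s[1] is taken of both).  Python B raises on the same inputs.
def pvPairOK (p c : String) : Bool :=
  decide (p.toList ≠ [] ∧ c.toList ≠ [] ∧
    ((c ≠ p ∧ c.toList.head? = p.toList.head?) → (2 ≤ p.toList.length ∧ 2 ≤ c.toList.length)))

def pvPreChain : List String → Bool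
  | [] => true
  | [_] => true
  | p :: c :: rest => pvPairOK p c && pvPreChain (c :: rest)

def Pre_sort_of_sorted (subject : List String) : Prop := pvPreChain subject = true
instance (subject : List String) : Decidable (Pre_sort_of_sorted subject) := by
  unfold Pre_sort_of_sorted; infer_instance

def pvWitness_sort_of_sorted : List String := ["ab", "aa", "b", "b", "ca"]

def Spec_sort_of_sorted (subject : List String) (out : Int × List String) : Prop := out = sort_of_sorted_alt subject
instance (subject : List String) (out : Int × List String) : Decidable (Spec_sort_of_sorted subject out) := by unfold Spec_sort_of_sorted; infer_instance

-- ===== CLAIM (what is proved, stated in full; the proofs are below) =====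
def Claim_equal_sort_of_sorted : Prop := ∀ (subject : List String), Dom_sort_of_sorted subject → Pre_sort_of_sorted subject → Spec_sort_of_sorted subject (sort_of_sorted subject)

-- ===== LEMMAS AND PROOFS =====

-- 'replace best if the candidate run is strictly longer' (the first-longest rule)
def pvPick (b r : List String) : List String := if r.length > b.length then r else b

theorem pvPick_nil (r : List String) : pvPick [] r = r := by
  cases r <;> simp [pvPick]

-- A's loop body classified by B's run-start test
theorem pvStepA_eq (t : Int) (res : List (List String)) (prev cur : String) :
    pvStepA (t, res) prev cur =
      if pvNewRun prev cur then (t + 1, res ++ [[cur]])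
      else (t, PySem.List.pySetD res t (PySem.List.pyGetD res t [] ++ [cur])) := by
  by_cases h1 : pvCharAtD cur 0 < pvCharAtD prev 0
  · simp [pvStepA, pvNewRun, h1]
  · by_cases h2 : cur = prev
    · simp [pvStepA, pvNewRun, h2]
    · by_cases h3 : pvCharAtD cur 0 = pvCharAtD prev 0
      · by_cases h4 : pvCharAtD cur 1 < pvCharAtD prev 1 <;>
          simp [pvStepA, pvNewRun, h2, h3, h4]
      · simp [pvStepA, pvNewRun, h1, h2, h3]

theorem pvGetLast (closed : List (List String)) (cur : List String) :
    PySem.List.pyGetD (closed ++ [cur]) ((closed.length : Int)) [] = cur := by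
  simp [PySem.List.pyGetD_natCast, List.getD_eq_getElem?_getD]

theorem pvSetLast (closed : List (List String)) (cur v : List String) :
    PySem.List.pySetD (closed ++ [cur]) ((closed.length : Int)) v = closed ++ [v] := by
  rw [PySem.List.pySetD_natCast]
  induction closed with
  | nil => simp
  | cons x t ih => simp [ih]

-- the head of the stable reverse sort by length is the running first-longest
theorem pvHeadSorted (rs : List (List String)) :
    PySem.List.pyGetD (PySem.List.sorted rs (fun (r : List String) => ((r.length : Nat) : Int)) true) 0 []
      = rs.foldl pvPick [] := by
  induction rs using List.reverseRecOn with
  | nil => rfl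
  | append_singleton rs x ih =>
    rw [PySem.List.sorted_rev_eq_foldl_insertBy, List.foldl_append,
        ← PySem.List.sorted_rev_eq_foldl_insertBy, List.foldl_append]
    cases hs : PySem.List.sorted rs (fun (r : List String) => ((r.length : Nat) : Int)) true with
    | nil =>
      have : rs = [] := (PySem.List.sorted_eq_nil_iff _ _ _).mp hs
      subst this
      simp [PySem.List.insertBy, pvPick_nil, PySem.List.pyGetD_zero_cons]
    | cons m t =>
      rw [hs] at ih
      simp only [PySem.List.pyGetD_zero_cons] at ih
      rw [← ih]
      simp only [List.foldl_cons, List.foldl_nil, PySem.List.insertBy, Nat.cast_lt]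
      by_cases hlt : m.length < x.length
      · simp [hlt, pvPick, PySem.List.pyGetD_zero_cons]
      · simp [hlt, pvPick, PySem.List.pyGetD_zero_cons]

-- slice facts on natural bounds
theorem pvSliceSingle (xs : List String) (k : Nat) (hk : k < xs.length) :
    PySem.List.slice xs (some (k : Int)) (some ((k + 1 : Nat) : Int)) = [xs.getD k ""] := by
  rw [PySem.List.slice_natCast]
  have h1 : k + 1 - k = 1 := by omega
  rw [h1, List.take_one, List.head?_drop, List.getD_eq_getElem?_getD]
  simp [List.getElem?_eq_getElem hk]

theorem pvSliceExtend (xs : List String) (a k : Nat) (hak : a ≤ k) (hk : k < xs.length) :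
    PySem.List.slice xs (some (a : Int)) (some ((k + 1 : Nat) : Int))
      = PySem.List.slice xs (some (a : Int)) (some (k : Int)) ++ [xs.getD k ""] := by
  rw [PySem.List.slice_natCast, PySem.List.slice_natCast]
  have h1 : k + 1 - a = (k - a) + 1 := by omega
  rw [h1, List.take_add_one]
  congr 1
  rw [List.getElem?_drop, List.getD_eq_getElem?_getD]
  have h2 : a + (k - a) = k := by omega
  simp [h2, List.getElem?_eq_getElem hk]

theorem pvSliceLen (xs : List String) (a b : Nat) (_hab : a ≤ b) (hb : b ≤ xs.length) :
    (PySem.List.slice xs (some (a : Int)) (some (b : Int))).length = b - a := by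
  rw [PySem.List.slice_natCast]
  simp [List.length_take, List.length_drop]
  omega

-- adjacent pairs of a snoc
theorem pvZipTailSnoc {α : Type} (l : List α) (m a : α) (h : l.getLast? = some m) :
    (l ++ [a]).zip (l ++ [a]).tail = l.zip l.tail ++ [(m, a)] := by
  induction l with
  | nil => simp at h
  | cons x t ih =>
    cases t with
    | nil =>
      simp at h
      simp [h]
    | cons y u =>
      have h' : (y :: u).getLast? = some m := by
        rw [List.getLast?_cons_cons] at h; exact h
      have := ih h'
      simp only [List.cons_append, List.tail_cons, List.zip_cons_cons] at this ⊢
      rw [this]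

-- zip-with-tail of a casted list is the casted zip-with-tail
theorem pvZipTailCast (l : List Nat) :
    (l.map (fun (m : Nat) => (m : Int))).zip ((l.map (fun (m : Nat) => (m : Int))).tail)
      = (l.zip l.tail).map (fun (p : Nat × Nat) => ((p.1 : Int), (p.2 : Int))) := by
  rw [← List.map_tail, List.zip_map]
  apply List.map_congr_left
  intro p _
  cases p
  rfl

-- Python's max over pairs keyed by the gap: first maximal (replace only on strict >)
def pvNatMax (b q : Nat × Nat) : Nat × Nat :=
  if (q.2 : Int) - q.1 > (b.2 : Int) - b.1 then q else b

theorem pvMaxPairCast (l : List (Nat × Nat)) :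
    ∀ (q : Nat × Nat),
      (l.map (fun (p : Nat × Nat) => ((p.1 : Int), (p.2 : Int)))).foldl
          (fun best q => if q.2 - q.1 > best.2 - best.1 then q else best)
          ((q.1 : Int), (q.2 : Int))
        = (((l.foldl pvNatMax q).1 : Int), ((l.foldl pvNatMax q).2 : Int)) := by
  induction l with
  | nil => intro q; rfl
  | cons p t ih =>
    intro q
    simp only [List.map_cons, List.foldl_cons]
    by_cases h : (p.2 : Int) - p.1 > (q.2 : Int) - q.1
    · rw [if_pos h]
      rw [show pvNatMax q p = p from if_pos h]
      exact ih p
    · rw [if_neg h]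
      rw [show pvNatMax q p = q from if_neg h]
      exact ih q

-- folding 'keep the strictly longer' over slices tracks the first widest gap
theorem pvFoldCorr (xs : List String) :
    ∀ (ps : List (Nat × Nat)) (b : Nat × Nat),
      b.1 ≤ b.2 → b.2 ≤ xs.length →
      (∀ p ∈ ps, p.1 ≤ p.2 ∧ p.2 ≤ xs.length) →
      (ps.foldl pvNatMax b).1 ≤ (ps.foldl pvNatMax b).2 ∧
      (ps.foldl pvNatMax b).2 ≤ xs.length ∧
      (ps.map (fun p => PySem.List.slice xs (some (p.1 : Int)) (some (p.2 : Int)))).foldl pvPick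
          (PySem.List.slice xs (some (b.1 : Int)) (some (b.2 : Int)))
        = PySem.List.slice xs (some ((ps.foldl pvNatMax b).1 : Int))
            (some ((ps.foldl pvNatMax b).2 : Int)) := by
  intro ps
  induction ps with
  | nil => intro b h1 h2 _; exact ⟨h1, h2, rfl⟩
  | cons p t ih =>
    intro b h1 h2 hall
    have hp := hall p (List.mem_cons_self)
    have hstep : pvPick (PySem.List.slice xs (some (b.1 : Int)) (some (b.2 : Int)))
        (PySem.List.slice xs (some (p.1 : Int)) (some (p.2 : Int)))
        = PySem.List.slice xs (some ((pvNatMax b p).1 : Int)) (some ((pvNatMax b p).2 : Int)) := by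
      unfold pvPick pvNatMax
      rw [pvSliceLen xs b.1 b.2 h1 h2, pvSliceLen xs p.1 p.2 hp.1 hp.2]
      by_cases h : (p.2 : Int) - p.1 > (b.2 : Int) - b.1
      · rw [if_pos h, if_pos (by omega)]
      · rw [if_neg h, if_neg (by omega)]
    have hb' : (pvNatMax b p).1 ≤ (pvNatMax b p).2 ∧ (pvNatMax b p).2 ≤ xs.length := by
      unfold pvNatMax
      by_cases h : (p.2 : Int) - p.1 > (b.2 : Int) - b.1
      · rw [if_pos h]; exact hp
      · rw [if_neg h]; exact ⟨h1, h2⟩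
    simp only [List.map_cons, List.foldl_cons, hstep]
    exact ih (pvNatMax b p) hb'.1 hb'.2 (fun q hq => hall q (List.mem_cons_of_mem p hq))

-- joint loop invariant: A's state is (number of closed runs, closed-run slices ++ [open slice]);
-- B's state is the list of break indices; both driven by the same run-start test
theorem pvInv (xs : List String) :
    ∀ (c s : Nat) (ns : List Nat) (lastb : Nat),
      s + c = xs.length → 1 ≤ s →
      ns.getLast? = some lastb → lastb < s →
      (∀ p ∈ ns.zip ns.tail, p.1 < p.2 ∧ p.2 < s) →
      ∃ (ns' : List Nat) (lastb' : Nat),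
        ns'.getLast? = some lastb' ∧ lastb' < xs.length ∧
        (∀ p ∈ ns'.zip ns'.tail, p.1 < p.2 ∧ p.2 < xs.length) ∧
        ((List.range' s c).foldl
            (fun bs (k : Nat) => if pvNewRun (PySem.List.pyGetD xs ((k : Int) - 1) "") (PySem.List.pyGetD xs (k : Int) "") then bs ++ [(k : Int)] else bs)
            (ns.map (fun (m : Nat) => (m : Int)))
          = ns'.map (fun (m : Nat) => (m : Int))) ∧
        ((List.range' s c).foldl
            (fun st (k : Nat) => pvStepA st (PySem.List.pyGetD xs ((k : Int) - 1) "") (PySem.List.pyGetD xs (k : Int) ""))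
            (((ns.zip ns.tail).length : Int),
              (ns.zip ns.tail).map (fun p => PySem.List.slice xs (some (p.1 : Int)) (some (p.2 : Int)))
                ++ [PySem.List.slice xs (some (lastb : Int)) (some (s : Int))])
          = (((ns'.zip ns'.tail).length : Int),
              (ns'.zip ns'.tail).map (fun p => PySem.List.slice xs (some (p.1 : Int)) (some (p.2 : Int)))
                ++ [PySem.List.slice xs (some (lastb' : Int)) (some ((s + c : Nat) : Int))])) := by
  intro c
  induction c with
  | zero =>
    intro s ns lastb hlen h1s hlast hlb hpairs
    refine ⟨ns, lastb, hlast, by omega, fun p hp => ⟨(hpairs p hp).1, by have := (hpairs p hp).2; omega⟩, by simp, by simp⟩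
  | succ c ih =>
    intro s ns lastb hlen h1s hlast hlb hpairs
    have hsn : s < xs.length := by omega
    have e1 : (s : Int) - 1 = ((s - 1 : Nat) : Int) := by omega
    simp only [List.range'_succ, List.foldl_cons]
    rw [e1, PySem.List.pyGetD_natCast, PySem.List.pyGetD_natCast, pvStepA_eq]
    by_cases h : pvNewRun (xs.getD (s - 1) "") (xs.getD s "")
    · rw [if_pos h, if_pos h]
      have hz := pvZipTailSnoc ns lastb s hlast
      obtain ⟨ns', lastb', hl', hlb', hp', hB, hA⟩ :=
        ih (s + 1) (ns ++ [s]) s (by omega) (by omega) (by simp) (by omega)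
          (by
            rw [hz]
            intro p hp
            rcases List.mem_append.mp hp with hp | hp
            · exact ⟨(hpairs p hp).1, by have := (hpairs p hp).2; omega⟩
            · simp at hp; subst hp; exact ⟨hlb, by omega⟩)
      refine ⟨ns', lastb', hl', hlb', hp', ?_, ?_⟩
      · rw [show (List.map (fun (m : Nat) => (m : Int)) ns) ++ [((s : Nat) : Int)]
              = List.map (fun (m : Nat) => (m : Int)) (ns ++ [s]) from by simp]
        exact hB
      · rw [show (((ns.zip ns.tail).length : Nat) : Int) + 1
              = ((((ns ++ [s]).zip (ns ++ [s]).tail).length : Nat) : Int) from by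
            rw [hz]; simp]
        rw [show (ns.zip ns.tail).map (fun (p : Nat × Nat) => PySem.List.slice xs (some (p.1 : Int)) (some (p.2 : Int)))
                ++ [PySem.List.slice xs (some (lastb : Int)) (some (s : Int))] ++ [[xs.getD s ""]]
              = ((ns ++ [s]).zip (ns ++ [s]).tail).map (fun (p : Nat × Nat) => PySem.List.slice xs (some (p.1 : Int)) (some (p.2 : Int)))
                ++ [PySem.List.slice xs (some (s : Int)) (some ((s + 1 : Nat) : Int))] from by
            rw [hz, pvSliceSingle xs s hsn]; simp [List.append_assoc]]
        rw [show s + (c + 1) = s + 1 + c from by omega]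
        exact hA
    · rw [if_neg h, if_neg h]
      obtain ⟨ns', lastb', hl', hlb', hp', hB, hA⟩ :=
        ih (s + 1) ns lastb (by omega) (by omega) hlast (by omega)
          (fun p hp => ⟨(hpairs p hp).1, by have := (hpairs p hp).2; omega⟩)
      refine ⟨ns', lastb', hl', hlb', hp', hB, ?_⟩
      rw [show (((ns.zip ns.tail).length : Nat) : Int)
            = ((((ns.zip ns.tail).map (fun (p : Nat × Nat) => PySem.List.slice xs (some (p.1 : Int)) (some (p.2 : Int)))).length : Nat) : Int) from by
          simp]
      rw [pvGetLast, ← pvSliceExtend xs lastb s (by omega) hsn, pvSetLast]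
      rw [show ((((ns.zip ns.tail).map (fun (p : Nat × Nat) => PySem.List.slice xs (some (p.1 : Int)) (some (p.2 : Int)))).length : Nat) : Int)
            = (((ns.zip ns.tail).length : Nat) : Int) from by simp]
      rw [show s + (c + 1) = s + 1 + c from by omega]
      exact hA

-- pyRange 1 n 1 fold as a fold over the natural indices 1 .. n-1
theorem pvFoldRange2 {σ : Type} (f : σ → Int → σ) (n : Nat) (init : σ) :
    (PySem.List.pyRange 1 ((n : Nat) : Int) 1).foldl f init
      = (List.range' 1 (n - 1)).foldl (fun st k => f st ((k : Nat) : Int)) init := by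
  rw [PySem.List.pyRange_one]
  have h : (((n : Nat) : Int) - 1).toNat = n - 1 := by omega
  rw [h, List.range'_eq_map_range, List.foldl_map, List.foldl_map]
  have e : ∀ (k : Nat), (1 : Int) + (k : Int) = ((1 + k : Nat) : Int) := by intro k; omega
  simp only [e]

theorem pvMain (subject : List String) : sort_of_sorted subject = sort_of_sorted_alt subject := by
  cases subject with
  | nil => rfl
  | cons x0 rest =>
    have hne : (x0 :: rest) ≠ [] := by simp
    have hpos : 0 < (x0 :: rest).length := by simp
    unfold sort_of_sorted sort_of_sorted_alt
    rw [if_neg hne, if_neg hne]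
    simp only [PySem.List.len_eq]
    rw [pvFoldRange2, pvFoldRange2]
    obtain ⟨ns', lastb', hl', hlb', hp', hB, hA⟩ :=
      pvInv (x0 :: rest) ((x0 :: rest).length - 1) 1 [0] 0 (by omega) (by omega) rfl (by omega)
        (by simp)
    have hs0 : PySem.List.slice (x0 :: rest) (some ((0 : Nat) : Int)) (some ((0 + 1 : Nat) : Int))
        = [(x0 :: rest).getD 0 ""] := pvSliceSingle _ 0 hpos
    rw [hs0] at hA
    rw [show 1 + ((x0 :: rest).length - 1) = (x0 :: rest).length from by omega] at hA
    simp only [List.tail_cons, List.zip_nil_right, List.length_nil, List.map_nil,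
      List.nil_append, Nat.cast_zero, List.map_cons, Nat.cast_zero] at hA hB
    rw [show PySem.List.pyGetD (x0 :: rest) 0 "" = (x0 :: rest).getD 0 "" from PySem.List.pyGetD_zero _ _] at *
    rw [hA, hB]
    simp only []
    rw [pvHeadSorted]
    have hzAll := pvZipTailSnoc ns' lastb' (x0 :: rest).length hl'
    cases hq : (ns'.zip ns'.tail) ++ [(lastb', (x0 :: rest).length)] with
    | nil => exact absurd hq (by simp)
    | cons q0 qrest =>
      have hgood : ∀ p ∈ q0 :: qrest, p.1 ≤ p.2 ∧ p.2 ≤ (x0 :: rest).length := by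
        rw [← hq]
        intro p hp
        rcases List.mem_append.mp hp with hp | hp
        · exact ⟨Nat.le_of_lt (hp' p hp).1, Nat.le_of_lt (hp' p hp).2⟩
        · simp at hp; subst hp; exact ⟨Nat.le_of_lt hlb', Nat.le_refl _⟩
      have hq0 := hgood q0 (List.mem_cons_self)
      obtain ⟨hr1, hr2, hfold⟩ :=
        pvFoldCorr (x0 :: rest) qrest q0 hq0.1 hq0.2
          (fun p hp => hgood p (List.mem_cons_of_mem q0 hp))
      -- A's run list is the slices of the adjacent break pairs
      have hsegs : (ns'.zip ns'.tail).map
            (fun (p : Nat × Nat) => PySem.List.slice (x0 :: rest) (some (p.1 : Int)) (some (p.2 : Int)))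
            ++ [PySem.List.slice (x0 :: rest) (some (lastb' : Int)) (some ((x0 :: rest).length : Int))]
          = (q0 :: qrest).map
            (fun (p : Nat × Nat) => PySem.List.slice (x0 :: rest) (some (p.1 : Int)) (some (p.2 : Int))) := by
        rw [← hq]; simp
      rw [hsegs, List.map_cons, List.foldl_cons, pvPick_nil, hfold]
      -- B's break pairs are the casted adjacent break pairs
      have hbz : (List.map (fun (m : Nat) => (m : Int)) ns' ++ [((x0 :: rest).length : Int)]).zip
            (List.map (fun (m : Nat) => (m : Int)) ns' ++ [((x0 :: rest).length : Int)]).tail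
          = (q0 :: qrest).map (fun (p : Nat × Nat) => ((p.1 : Int), (p.2 : Int))) := by
        rw [show List.map (fun (m : Nat) => (m : Int)) ns' ++ [((x0 :: rest).length : Int)]
              = List.map (fun (m : Nat) => (m : Int)) (ns' ++ [(x0 :: rest).length]) from by simp,
            pvZipTailCast, hzAll, hq]
      rw [hbz, List.map_cons]
      simp only [pvMaxPair]
      rw [pvMaxPairCast]
      -- outputs agree: length of the chosen slice is its gap
      have hl := pvSliceLen (x0 :: rest) (qrest.foldl pvNatMax q0).1 (qrest.foldl pvNatMax q0).2 hr1 hr2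
      simp only [hl]
      rw [show ((((qrest.foldl pvNatMax q0).2 - (qrest.foldl pvNatMax q0).1 : Nat)) : Int)
            = (((qrest.foldl pvNatMax q0).2 : Nat) : Int) - (((qrest.foldl pvNatMax q0).1 : Nat) : Int) from by omega]

-- ===== VERDICT (by name: the statement is the Claim_ definition above) =====
theorem sort_of_sorted_spec : Claim_equal_sort_of_sorted := by
  intro subject _ _
  unfold Spec_sort_of_sorted
  exact pvMain subject
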